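-- pv_equiv track=rewrite | github.com/saiNikhil0501/Information-Retrieval | Indexing and Retrieval/retrieve.py | successorCount
-- ===== SOURCE A (Python) =====
-- def successorCount(arr):
--     ar = arr[0]
--     count = 0
--     for x in ar:
--         successor_found = False
--         for j in range(1, len(arr)):
--             if x + 1 in arr[j]:
--                 x += 1
--                 successor_found = True
--             else:
--                 break
--         if successor_found is True:
--             count += 1
--     return count
-- ===== SOURCE B (Python) =====
-- def successorCount(arr):
--     if len(arr) < 2:
--         return 0
--     first, second = arr[0], arr[1]
--     return sum(1 for x in first if x + 1 in second)
-- ===== Notes on version B (the rewrite author's own statement) =====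
-- stated objective: simpler
-- what changed: A's chained inner loop over all subsequent lists is dead code for the returned count (count increments iff the very first check x+1 in arr[1] succeeds), so B replaces the nested loops with a single membership count over arr[0] against arr[1].
-- outside the precondition, e.g. on successorCount([]): A raises IndexError, B returns 0
import Mathlib
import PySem

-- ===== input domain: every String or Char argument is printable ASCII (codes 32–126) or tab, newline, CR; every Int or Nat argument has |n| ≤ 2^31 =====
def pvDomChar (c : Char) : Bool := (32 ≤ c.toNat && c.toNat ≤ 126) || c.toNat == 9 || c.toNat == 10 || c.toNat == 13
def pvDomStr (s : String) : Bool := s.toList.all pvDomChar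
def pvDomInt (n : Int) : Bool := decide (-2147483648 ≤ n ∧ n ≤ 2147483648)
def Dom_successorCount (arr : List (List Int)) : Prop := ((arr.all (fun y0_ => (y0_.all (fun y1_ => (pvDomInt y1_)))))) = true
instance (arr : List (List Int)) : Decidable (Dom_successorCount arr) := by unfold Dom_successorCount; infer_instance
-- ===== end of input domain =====

-- B drops A's chained inner loop (dead for the return value): it counts x in arr[0] with x+1 in arr[1]. Simpler; same result.

-- ===== PORT A =====
-- the inner 'for j in range(1, len(arr)): … else: break' loop; state = (x, successor_found)
def pvInnerA (arr : List (List Int)) (js : List Int) (x : Int) (found : Bool) : Bool :=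
  match js with
  | [] => found
  | j :: rest =>
    if (x + 1) ∈ ((PySem.List.pyGet? arr j).getD []) then pvInnerA arr rest (x + 1) true
    else found

def successorCount (arr : List (List Int)) : Int :=
  -- arr[0]: under Pre_ (arr ≠ []) pyGet? is some, so getD [] is exact
  let ar := (PySem.List.pyGet? arr 0).getD []
  ar.foldl
    (fun count x =>
      if pvInnerA arr (PySem.List.pyRange 1 arr.length 1) x false then count + 1 else count)
    0

-- ===== PORT B =====
def successorCount_alt (arr : List (List Int)) : Int :=
  match arr with
  | first :: second :: _ => (first.countP (fun x => decide ((x + 1) ∈ second)) : Int)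
  | _ => 0

-- ===== PRECONDITION & SPEC =====
-- Pre_ excludes only arr = [], on which A raises IndexError at arr[0]
def Pre_successorCount (arr : List (List Int)) : Prop := arr ≠ []
instance (arr : List (List Int)) : Decidable (Pre_successorCount arr) := by unfold Pre_successorCount; infer_instance
def pvWitness_successorCount : List (List Int) := [[1, 2], [2, 5], [3]]

def Spec_successorCount (arr : List (List Int)) (out : Int) : Prop := out = successorCount_alt arr
instance (arr : List (List Int)) (out : Int) : Decidable (Spec_successorCount arr out) := by unfold Spec_successorCount; infer_instance

-- ===== CLAIM (what is proved, stated in full; the proofs are below) =====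
def Claim_equal_successorCount : Prop := ∀ (arr : List (List Int)), Dom_successorCount arr → Pre_successorCount arr → Spec_successorCount arr (successorCount arr)

-- ===== LEMMAS AND PROOFS =====

-- the inner loop with found = true always reports true
theorem pvInnerA_true (arr : List (List Int)) (js : List Int) (x : Int) :
    pvInnerA arr js x true = true := by
  induction js generalizing x with
  | nil => rfl
  | cons j rest ih =>
    simp only [pvInnerA]
    split
    · exact ih _
    · rfl

-- a counting foldl is countP
theorem foldl_count (l : List Int) (p : Int → Bool) (c : Int) :
    l.foldl (fun count x => if p x then count + 1 else count) c
      = c + (l.countP p : Int) := by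
  induction l generalizing c with
  | nil => simp
  | cons a t ih =>
    simp only [List.foldl_cons, List.countP_cons, ih]
    by_cases h : p a
    · simp [h]; ring
    · simp [h]

theorem foldl_const_int (l : List Int) (c : Int) :
    l.foldl (fun count _ => count) c = c := by
  induction l generalizing c with
  | nil => rfl
  | cons a t ih => exact ih c

theorem pyGet_cons_zero (a : List Int) (t : List (List Int)) :
    (PySem.List.pyGet? (a :: t) 0).getD [] = a := by
  simp [PySem.List.pyGet?, PySem.List.pyIdx?]

theorem pyGet_cons_one (a b : List Int) (t : List (List Int)) :
    (PySem.List.pyGet? (a :: b :: t) 1).getD [] = b := by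
  simp [PySem.List.pyGet?, PySem.List.pyIdx?]

theorem pvInnerA_cons_one (a0 a1 : List Int) (t : List (List Int)) (js : List Int) (x : Int) :
    pvInnerA (a0 :: a1 :: t) (1 :: js) x false = decide ((x + 1) ∈ a1) := by
  simp only [pvInnerA, pyGet_cons_one]
  by_cases h : (x + 1) ∈ a1
  · simp [h, pvInnerA_true]
  · simp [h]

-- ===== VERDICT (by name: the statement is the Claim_ definition above) =====
theorem successorCount_spec : Claim_equal_successorCount := by
  intro arr _ hpre
  unfold Spec_successorCount
  match arr with
  | [] => exact absurd rfl hpre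
  | [a0] =>
    show successorCount [a0] = successorCount_alt [a0]
    simp only [successorCount, successorCount_alt, pyGet_cons_zero]
    have hz : PySem.List.pyRange 1 (([a0] : List (List Int)).length : Int) 1 = [] :=
      PySem.List.pyRange_one_eq_nil (by simp)
    rw [hz]
    simpa only [pvInnerA] using foldl_const_int a0 0
  | a0 :: a1 :: t =>
    show successorCount (a0 :: a1 :: t) = successorCount_alt (a0 :: a1 :: t)
    have hlen : (1 : Int) < ((a0 :: a1 :: t).length : Int) := by
      simp only [List.length_cons]; push_cast; omega
    have hr := PySem.List.pyRange_one_cons hlen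
    simp only [successorCount, successorCount_alt, pyGet_cons_zero]
    rw [hr]
    simp only [pvInnerA_cons_one]
    rw [foldl_count]
    ring
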